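-- pv_equiv track=rewrite | github.com/mathurpriyanshu/cis6930sp24-assignment2 | assignment2.py | rank_locations
-- ===== SOURCE A (Python) =====
-- from collections import Counter
--
-- def rank_locations(incidents):
--     locations = [incident[2] for incident in incidents]
--     location_freq = Counter(locations)
--     sorted_locations = sorted(location_freq.items(), key=lambda x: (-x[1], x[0]))
--
--     ranks = {}
--     last_freq = None
--     last_rank = 0
--     skip = 1
--     for location, freq in sorted_locations:
--         if freq == last_freq:
--             ranks[location] = last_rank
--             skip += 1
--         else:
--             last_rank += skip
--             ranks[location] = last_rank
--             skip = 1
--         last_freq = freq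
--
--     return ranks
-- ===== SOURCE B (Python) =====
-- from collections import Counter
-- import bisect
--
-- def rank_locations(incidents):
--     freq = Counter(incident[2] for incident in incidents)
--     fs = sorted(freq.values())
--     m = len(fs)
--     ranks = {}
--     for location, f in sorted(freq.items(), key=lambda x: (-x[1], x[0])):
--         ranks[location] = m - bisect.bisect_right(fs, f) + 1
--     return ranks
-- ===== Notes on version B (the rewrite author's own statement) =====
-- stated objective: alternative
-- what changed: Replaced A's descending-sort pass with stateful last_freq/last_rank/skip accumulators by a closed-form competition rank per location: 1 + (number of strictly greater frequencies), computed as m - bisect_right over an ascending sorted frequency array.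
import Mathlib
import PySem

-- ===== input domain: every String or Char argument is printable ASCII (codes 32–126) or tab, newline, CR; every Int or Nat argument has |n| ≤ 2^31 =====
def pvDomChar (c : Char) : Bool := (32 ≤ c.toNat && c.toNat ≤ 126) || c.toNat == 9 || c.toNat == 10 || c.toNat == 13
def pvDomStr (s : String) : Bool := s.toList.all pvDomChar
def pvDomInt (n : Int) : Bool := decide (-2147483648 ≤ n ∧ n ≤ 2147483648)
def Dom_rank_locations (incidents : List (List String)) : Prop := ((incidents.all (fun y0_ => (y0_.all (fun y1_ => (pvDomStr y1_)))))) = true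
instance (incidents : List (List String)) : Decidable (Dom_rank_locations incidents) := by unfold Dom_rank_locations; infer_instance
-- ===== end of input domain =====

-- B replaces A's stateful skip/last_rank accumulator with a closed-form competition rank
-- (1 + number of strictly greater frequencies, via bisect on a sorted frequency array); objective: alternative.


-- ===== PORT A =====
-- the 'for location, freq in sorted_locations' loop with its ranks/last_freq/last_rank/skip state
def rankLoopA : List (String × Int) → PySem.Dict String Int → Option Int → Int → Int → PySem.Dict String Int
  | [], ranks, _, _, _ => ranks
  | p :: rest, ranks, lastFreq, lastRank, skip =>
      if some p.2 == lastFreq then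
        rankLoopA rest (ranks.insert p.1 lastRank) (some p.2) lastRank (skip + 1)
      else
        rankLoopA rest (ranks.insert p.1 (lastRank + skip)) (some p.2) (lastRank + skip) 1

def rank_locations (incidents : List (List String)) : List (String × Int) :=
  let locations := incidents.map (fun incident => PySem.List.pyGetD incident 2 "")
  let location_freq := PySem.Dict.counter locations
  let sorted_locations := PySem.List.sorted2 location_freq.items (fun x => -x.2) (fun x => x.1)
  (rankLoopA sorted_locations PySem.Dict.empty none 0 1).items

-- ===== PORT B =====
def rank_locations_alt (incidents : List (List String)) : List (String × Int) :=
  let freq := PySem.Dict.counter (incidents.map (fun incident => PySem.List.pyGetD incident 2 ""))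
  let fs := PySem.List.sorted freq.values (fun v => v)
  let m : Int := fs.length
  ((PySem.List.sorted2 freq.items (fun x => -x.2) (fun x => x.1)).foldl
      (fun ranks p => ranks.insert p.1 (m - (PySem.List.bisectRight fs p.2 : Int) + 1))
      PySem.Dict.empty).items

-- ===== PRECONDITION & SPEC =====
-- Pre_ excludes exactly the inputs where incident[2] raises IndexError (an inner list shorter than 3) in both programs.
def Pre_rank_locations (incidents : List (List String)) : Prop :=
  ∀ incident ∈ incidents, 3 ≤ incident.length
instance (incidents : List (List String)) : Decidable (Pre_rank_locations incidents) := by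
  unfold Pre_rank_locations; infer_instance

def pvWitness_rank_locations : List (List String) :=
  [["1", "EMS", "Main St"], ["2", "Fire", "Oak Ave"], ["3", "EMS", "Main St"]]

def Spec_rank_locations (incidents : List (List String)) (out : List (String × Int)) : Prop := out = rank_locations_alt incidents
instance (incidents : List (List String)) (out : List (String × Int)) : Decidable (Spec_rank_locations incidents out) := by unfold Spec_rank_locations; infer_instance

-- ===== CLAIM (what is proved, stated in full; the proofs are below) =====
def Claim_equal_rank_locations : Prop := ∀ (incidents : List (List String)), Dom_rank_locations incidents → Pre_rank_locations incidents → Spec_rank_locations incidents (rank_locations incidents)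

-- ===== LEMMAS AND PROOFS =====

-- insertion with an asymmetric, transitive 'before' predicate preserves the weak ordering
lemma pairwise_insertBy {α : Type} (before : α → α → Bool)
    (hasym : ∀ a b, before a b = true → before b a = false)
    (htrans : ∀ a b c, before a b = true → before b c = true → before a c = true)
    (x : α) (ys : List α) (h : ys.Pairwise (fun a b => before b a = false)) :
    (PySem.List.insertBy before x ys).Pairwise (fun a b => before b a = false) := by
  induction ys with
  | nil => simp [PySem.List.insertBy]
  | cons y ys ih =>
    rw [PySem.List.insertBy]
    by_cases hxy : before x y = true
    · simp only [hxy, if_pos]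
      refine List.Pairwise.cons ?_ h
      intro z hz
      rcases List.mem_cons.1 hz with rfl | hz'
      · exact hasym _ _ hxy
      · rcases h with _ | ⟨hy, hys⟩
        by_contra hc
        have hzx : before z x = true := by
          cases hzx : before z x with
          | true => rfl
          | false => exact absurd hzx hc
        have := htrans z x y hzx hxy
        rw [hy z hz'] at this
        exact Bool.false_ne_true this
    · have hxy' : before x y = false := by
        cases hv : before x y with
        | true => exact absurd hv hxy
        | false => rfl
      simp only [hxy', Bool.false_eq_true, if_neg, not_false_iff]
      rcases h with _ | ⟨hy, hys⟩
      refine List.Pairwise.cons ?_ (ih hys)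
      intro z hz
      rcases (PySem.List.mem_insertBy before x z ys).1 hz with rfl | hz'
      · exact hxy'
      · exact hy z hz'

lemma pairwise_foldl_insertBy {α : Type} (before : α → α → Bool)
    (hasym : ∀ a b, before a b = true → before b a = false)
    (htrans : ∀ a b c, before a b = true → before b c = true → before a c = true)
    (xs acc : List α) (hacc : acc.Pairwise (fun a b => before b a = false)) :
    (xs.foldl (fun acc x => PySem.List.insertBy before x acc) acc).Pairwise
      (fun a b => before b a = false) := by
  induction xs generalizing acc with
  | nil => exact hacc
  | cons x xs ih =>
    exact ih _ (pairwise_insertBy before hasym htrans x acc hacc)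

-- the lexicographic 'before' used by sorted(key=lambda x: (-x[1], x[0]))
def lexBefore (a b : String × Int) : Bool :=
  decide ((fun x : String × Int => -x.2) a < (fun x : String × Int => -x.2) b) ||
    (!decide ((fun x : String × Int => -x.2) b < (fun x : String × Int => -x.2) a) &&
      decide ((fun x : String × Int => x.1) a < (fun x : String × Int => x.1) b))

lemma lexBefore_asym : ∀ a b, lexBefore a b = true → lexBefore b a = false := by
  intro a b h
  cases hba : lexBefore b a with
  | false => rfl
  | true =>
    exfalso
    simp only [lexBefore, Bool.or_eq_true, Bool.and_eq_true, Bool.not_eq_true',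
      decide_eq_true_iff, decide_eq_false_iff_not] at h hba
    rcases h with h | ⟨h1, h2⟩ <;> rcases hba with hba | ⟨hba1, hba2⟩
    · omega
    · omega
    · omega
    · exact absurd hba2 (lt_asymm h2)

lemma lexBefore_trans : ∀ a b c, lexBefore a b = true → lexBefore b c = true → lexBefore a c = true := by
  intro a b c hab hbc
  simp only [lexBefore, Bool.or_eq_true, Bool.and_eq_true, Bool.not_eq_true',
    decide_eq_true_iff, decide_eq_false_iff_not] at *
  rcases hab with hab | ⟨hab1, hab2⟩ <;> rcases hbc with hbc | ⟨hbc1, hbc2⟩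
  · exact Or.inl (by omega)
  · exact Or.inl (by omega)
  · exact Or.inl (by omega)
  · exact Or.inr ⟨by omega, lt_trans hab2 hbc2⟩

lemma sorted2_freq_pairwise (items : List (String × Int)) :
    (PySem.List.sorted2 items (fun x => -x.2) (fun x => x.1)).Pairwise
      (fun a b => b.2 ≤ a.2) := by
  have h : (PySem.List.sorted2 items (fun x => -x.2) (fun x => x.1)).Pairwise
      (fun a b => lexBefore b a = false) := by
    have : PySem.List.sorted2 items (fun x => -x.2) (fun x => x.1)
        = items.foldl (fun acc x => PySem.List.insertBy lexBefore x acc) [] := rfl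
    rw [this]
    exact pairwise_foldl_insertBy lexBefore lexBefore_asym lexBefore_trans items [] (by simp)
  refine h.imp ?_
  intro a b hba
  simp only [lexBefore, Bool.or_eq_false_iff, Bool.and_eq_false_iff,
    decide_eq_false_iff_not] at hba
  have h1 := hba.1
  omega

-- length - bisect_right on a sorted list counts the strictly greater elements
lemma bisectRight_count (ws : List Int) (hws : ws.Pairwise (fun a b => a ≤ b)) (f : Int) :
    (ws.length : Int) - (PySem.List.bisectRight ws f : Int)
      = (ws.countP (fun x => decide (f < x)) : Int) := by
  obtain ⟨hle, hpre, hsuf⟩ := PySem.List.bisectRight_spec ws f hws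
  set k := PySem.List.bisectRight ws f with hk
  have hsplit : ws = ws.take k ++ ws.drop k := (List.take_append_drop k ws).symm
  have h1 : (ws.take k).countP (fun x => decide (f < x)) = 0 := by
    rw [List.countP_eq_zero]
    intro x hx
    obtain ⟨j, hj, rfl⟩ := List.getElem_of_mem hx
    have hjk : j < k := by
      have := hj; simp [List.length_take] at this; omega
    have hjlen : j < ws.length := by
      have := hj; simp [List.length_take] at this; omega
    rw [List.getElem_take]
    have := hpre j hjlen hjk
    simp
    omega
  have h2 : (ws.drop k).countP (fun x => decide (f < x)) = (ws.drop k).length := by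
    rw [List.countP_eq_length]
    intro x hx
    obtain ⟨j, hj, rfl⟩ := List.getElem_of_mem hx
    rw [List.getElem_drop]
    have hjlen : k + j < ws.length := by
      have := hj; simp [List.length_drop] at this; omega
    have := hsuf (k + j) hjlen (by omega)
    simp
    omega
  have : ws.countP (fun x => decide (f < x))
      = (ws.take k).countP (fun x => decide (f < x)) + (ws.drop k).countP (fun x => decide (f < x)) := by
    conv_lhs => rw [hsplit]
    exact List.countP_append ..
  rw [this, h1, h2, List.length_drop]
  omega

-- the B-side rank value counts strictly greater frequencies in the sorted items list
lemma alt_value_eq (items : List (String × Int)) (f : Int) :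
    ((PySem.List.sorted (items.map (·.2)) (fun v => v)).length : Int)
        - (PySem.List.bisectRight (PySem.List.sorted (items.map (·.2)) (fun v => v)) f : Int)
      = ((PySem.List.sorted2 items (fun x => -x.2) (fun x => x.1)).countP
          (fun q => decide (f < q.2)) : Int) := by
  set fs := PySem.List.sorted (items.map (·.2)) (fun v => v) with hfs
  have hsorted : fs.Pairwise (fun a b => a ≤ b) := by
    simpa using PySem.List.sorted_pairwise (items.map (·.2)) (fun v => v)
  rw [bisectRight_count fs hsorted f]
  have hperm1 : fs.Perm (items.map (·.2)) := PySem.List.sorted_perm ..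
  have hperm2 : (PySem.List.sorted2 items (fun x => -x.2) (fun x => x.1)).Perm items :=
    PySem.List.sorted2_perm ..
  rw [hperm1.countP_eq, hperm2.countP_eq, List.countP_map]
  rfl

-- main loop invariant: with P already processed (S = P ++ L), last_rank = C lf + 1 and
-- last_rank + skip = |P| + 1, A's loop assigns each remaining location the closed-form rank C f + 1
lemma loop_eq (S : List (String × Int)) (hS : S.Pairwise (fun a b => b.2 ≤ a.2))
    (C : Int → Int) (hC : ∀ f, C f = (S.countP (fun q => decide (f < q.2)) : Int)) :
    ∀ (L P : List (String × Int)) (ranks : PySem.Dict String Int) (lf lastRank skip : Int),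
      S = P ++ L →
      (∀ p ∈ P, lf ≤ p.2) →
      (∀ p ∈ L, p.2 ≤ lf) →
      lastRank = C lf + 1 →
      lastRank + skip = (P.length : Int) + 1 →
      rankLoopA L ranks (some lf) lastRank skip
        = L.foldl (fun r p => r.insert p.1 (C p.2 + 1)) ranks := by
  intro L
  induction L with
  | nil => intro P ranks lf lastRank skip _ _ _ _ _; rfl
  | cons p rest ih =>
    intro P ranks lf lastRank skip hSP hP hL hRank hSkip
    have hLpair : (p :: rest).Pairwise (fun a b => b.2 ≤ a.2) :=
      ((List.pairwise_append.1 (hSP ▸ hS)).2.1)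
    have hple : p.2 ≤ lf := hL p (List.mem_cons_self ..)
    rw [rankLoopA]
    by_cases hf : p.2 = lf
    · have hcond : (some p.2 == some lf) = true := by simp [hf]
      simp only [hcond, if_true, List.foldl_cons]
      have hval : lastRank = C p.2 + 1 := by rw [hf]; exact hRank
      rw [hval]
      refine ih (P ++ [p]) _ p.2 (C p.2 + 1) (skip + 1) (by simp [hSP]) ?_ ?_ rfl ?_
      · intro q hq
        rcases List.mem_append.1 hq with hq | hq
        · have := hP q hq; omega
        · simp at hq; subst hq; omega
      · intro q hq
        have := List.rel_of_pairwise_cons hLpair hq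
        omega
      · simp
        omega
    · have hcond : (some p.2 == some lf) = false := by simp [hf]
      simp only [hcond, Bool.false_eq_true, if_false, List.foldl_cons]
      have hflt : p.2 < lf := lt_of_le_of_ne hple hf
      have hCf : C p.2 = (P.length : Int) := by
        rw [hC p.2, hSP, List.countP_append, List.countP_cons]
        have hPfull : P.countP (fun q => decide (p.2 < q.2)) = P.length := by
          rw [List.countP_eq_length]
          intro q hq
          have := hP q hq
          simp; omega
        have hLzero : rest.countP (fun q => decide (p.2 < q.2)) = 0 := by
          rw [List.countP_eq_zero]
          intro q hq
          have := List.rel_of_pairwise_cons hLpair hq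
          simp; omega
        simp [hPfull, hLzero]
      have hval : lastRank + skip = C p.2 + 1 := by rw [hCf]; exact hSkip
      rw [hval]
      refine ih (P ++ [p]) _ p.2 (C p.2 + 1) 1 (by simp [hSP]) ?_ ?_ rfl ?_
      · intro q hq
        rcases List.mem_append.1 hq with hq | hq
        · have := hP q hq; omega
        · simp at hq; subst hq; omega
      · intro q hq
        exact List.rel_of_pairwise_cons hLpair hq
      · simp
        omega

-- starting the loop from the initial (None, 0, 1) state
lemma loop_start (S : List (String × Int)) (hS : S.Pairwise (fun a b => b.2 ≤ a.2))
    (C : Int → Int) (hC : ∀ f, C f = (S.countP (fun q => decide (f < q.2)) : Int)) :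
    rankLoopA S PySem.Dict.empty none 0 1
      = S.foldl (fun r p => r.insert p.1 (C p.2 + 1)) PySem.Dict.empty := by
  cases S with
  | nil => rfl
  | cons x rest =>
    have hC0 : C x.2 = 0 := by
      rw [hC x.2, List.countP_cons]
      have : rest.countP (fun q => decide (x.2 < q.2)) = 0 := by
        rw [List.countP_eq_zero]
        intro q hq
        have := List.rel_of_pairwise_cons hS hq
        simp; omega
      simp [this]
    rw [rankLoopA]
    have hcond : (some x.2 == (none : Option Int)) = false := rfl
    simp only [hcond, Bool.false_eq_true, if_false, List.foldl_cons]
    have h01 : (0 : Int) + 1 = C x.2 + 1 := by omega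
    rw [h01]
    refine loop_eq (x :: rest) hS C hC rest [x] _ x.2 (C x.2 + 1) 1 rfl ?_ ?_ rfl ?_
    · intro q hq; simp at hq; subst hq; omega
    · intro q hq; exact List.rel_of_pairwise_cons hS hq
    · simp; omega

theorem rank_locations_eq_alt (incidents : List (List String)) :
    rank_locations incidents = rank_locations_alt incidents := by
  unfold rank_locations rank_locations_alt
  set items := (PySem.Dict.counter
      (incidents.map (fun incident => PySem.List.pyGetD incident 2 ""))).items with hitems
  have hvalues : (PySem.Dict.counter
      (incidents.map (fun incident => PySem.List.pyGetD incident 2 ""))).values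
      = items.map (·.2) := rfl
  simp only [hvalues]
  set S := PySem.List.sorted2 items (fun x => -x.2) (fun x => x.1) with hSdef
  set fs := PySem.List.sorted (items.map (·.2)) (fun v => v) with hfs
  have hS : S.Pairwise (fun a b => b.2 ≤ a.2) := sorted2_freq_pairwise items
  have hloop := loop_start S hS
      (fun f => (fs.length : Int) - (PySem.List.bisectRight fs f : Int))
      (fun f => alt_value_eq items f)
  rw [hloop]

-- ===== VERDICT (by name: the statement is the Claim_ definition above) =====
theorem rank_locations_spec : Claim_equal_rank_locations := by
  intro incidents _ _
  exact rank_locations_eq_alt incidents
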